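-- pv_equiv track=rewrite | github.com/rodrigopivi/aida | python/src/languages/en/english_tokenizer.py | split_word_to_bigrams
-- ===== SOURCE A (Python) =====
-- def split_word_to_bigrams(word):
--     ngram = 2
--     grams = []
--     index = len(word) - ngram + 1
--     if index < 1:
--         return grams
--     for index in list(range(index)):
--         grams.append(word[index:index+ngram])
--     return grams
-- ===== SOURCE B (Python) =====
-- def split_word_to_bigrams(word):
--     return [a + b for a, b in zip(word, word[1:])]
-- ===== Notes on version B (the rewrite author's own statement) =====
-- stated objective: idiomatic
-- what changed: Replaced the index-range loop with explicit length arithmetic and slicing by a direct comprehension over adjacent character pairs via zip(word, word[1:]).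
import Mathlib
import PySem

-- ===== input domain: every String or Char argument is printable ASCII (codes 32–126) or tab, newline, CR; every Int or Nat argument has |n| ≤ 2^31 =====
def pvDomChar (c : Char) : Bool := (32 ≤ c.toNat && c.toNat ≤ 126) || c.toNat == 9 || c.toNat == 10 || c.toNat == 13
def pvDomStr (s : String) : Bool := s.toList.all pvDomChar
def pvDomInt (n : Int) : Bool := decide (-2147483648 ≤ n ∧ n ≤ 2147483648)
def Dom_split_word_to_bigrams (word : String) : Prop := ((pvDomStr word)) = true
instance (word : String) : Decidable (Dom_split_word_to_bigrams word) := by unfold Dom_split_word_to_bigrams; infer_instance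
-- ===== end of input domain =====

-- B replaces A's index-range-and-slice loop by a direct map over adjacent character pairs (zip word word[1:]); objective: idiomatic.


-- ===== PORT A =====
def split_word_to_bigrams (word : String) : List String :=
  let ngram : Int := 2
  let grams : List String := []
  let index : Int := (word.toList.length : Int) - ngram + 1
  if index < 1 then grams
  else
    (PySem.List.pyRange 0 index 1).foldl
      (fun gs i => gs ++ [String.ofList (PySem.List.slice word.toList (some i) (some (i + ngram)))])
      grams

-- ===== PORT B =====
def split_word_to_bigrams_alt (word : String) : List String :=
  (word.toList.zip word.toList.tail).map (fun p => String.ofList [p.1, p.2])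

-- ===== PRECONDITION & SPEC =====
def Spec_split_word_to_bigrams (word : String) (out : List String) : Prop := out = split_word_to_bigrams_alt word
instance (word : String) (out : List String) : Decidable (Spec_split_word_to_bigrams word out) := by unfold Spec_split_word_to_bigrams; infer_instance

-- ===== CLAIM (what is proved, stated in full; the proofs are below) =====
def Claim_equal_split_word_to_bigrams : Prop := ∀ (word : String), Dom_split_word_to_bigrams word → Spec_split_word_to_bigrams word (split_word_to_bigrams word)

-- ===== LEMMAS AND PROOFS =====

-- adjacent pairs via zip = two-element windows via range/drop/take
theorem zip_tail_eq_range_windows (cs : List Char) :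
    (cs.zip cs.tail).map (fun p => [p.1, p.2])
      = (List.range (cs.length - 1)).map (fun k => (cs.drop k).take 2) := by
  induction cs with
  | nil => simp
  | cons a t ih =>
    cases t with
    | nil => simp
    | cons b u =>
      simp only [List.tail_cons, List.zip_cons_cons, List.map_cons, List.length_cons,
        Nat.add_sub_cancel, List.range_succ_eq_map, List.map_map]
      refine congrArg (_ :: ·) ?_
      simp only [List.tail_cons, List.length_cons, Nat.add_sub_cancel] at ih
      rw [ih]
      refine List.map_congr_left ?_
      intro k _
      simp

-- ===== VERDICT (by name: the statement is the Claim_ definition above) =====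
theorem split_word_to_bigrams_spec : Claim_equal_split_word_to_bigrams := by
  intro word _
  unfold Spec_split_word_to_bigrams split_word_to_bigrams split_word_to_bigrams_alt
  simp only []
  set cs := word.toList with hcs
  by_cases h : ((cs.length : Int) - 2 + 1) < 1
  · match cs, h with
    | [], _ => simp
    | [a], _ => simp
    | a :: b :: t, h => simp at h; omega
  · simp only [if_neg h]
    rw [PySem.List.foldl_append_singleton_eq_map, PySem.List.pyRange_one]
    have hlen : ((cs.length : Int) - 2 + 1 - 0).toNat = cs.length - 1 := by omega
    have hB : (cs.zip cs.tail).map (fun p => String.ofList [p.1, p.2])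
        = ((List.range (cs.length - 1)).map (fun k => (cs.drop k).take 2)).map String.ofList := by
      rw [← zip_tail_eq_range_windows]
      simp [List.map_map, Function.comp_def]
    rw [hlen, hB, List.map_map, List.map_map]
    refine List.nil_append _ ▸ List.map_congr_left ?_
    intro k _
    simp only [Function.comp_apply, zero_add]
    rw [show ((k : Int) + 2) = ((k : Int) + ((2 : Nat) : Int)) by push_cast; ring,
      PySem.List.slice_natCast_add]
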